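-- pv_equiv track=rewrite | github.com/KJOSHI1081/Interview-Preparations | Phase I/Arrays & Strings/7_divide_n_conquer.py | constructBeautifulArray
-- ===== SOURCE A (Python) =====
-- def constructBeautifulArray(n: int) -> list[int]:
--     """
--     6. BEAUTIFUL ARRAY
--     Definition: Array where for i < k < j, arr[i] + arr[j] != 2*arr[k].
--     Input: n = 4
--     Output: [1, 3, 2, 4]
--     Complexity: Time O(N log N)
--     """
--     # Logic: (Odd + Even) != 2 * k. Transform range(n) into Odds and Evens recursively.
--     memo = {1: [1]}
--     def solve(count):
--         if count in memo: return memo[count]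
--         # Map odd indices: 2*x - 1, Map even indices: 2*x
--         odds = solve((count + 1) // 2)
--         evens = solve(count // 2)
--         memo[count] = [2 * x - 1 for x in odds] + [2 * x for x in evens]
--         return memo[count]
--     return solve(n)
-- ===== SOURCE B (Python) =====
-- def constructBeautifulArray(n: int) -> list[int]:
--     # Bottom-up bit-reversal doubling: grow the beautiful order of 0..2^k-1
--     # until it covers n, then keep values < n (order preserved) and shift to 1..n.
--     seq = [0]
--     while len(seq) < n:
--         seq = [2 * x for x in seq] + [2 * x + 1 for x in seq]
--     return [x + 1 for x in seq if x < n]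
-- ===== Notes on version B (the rewrite author's own statement) =====
-- stated objective: alternative
-- what changed: Replaces A's top-down memoized recursion (mapping odd/even halves via 2x-1 and 2x) by a bottom-up bit-reversal doubling loop that grows the beautiful order of 0..2^k-1 until it covers n, then filters values < n and shifts by 1.
import Mathlib
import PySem

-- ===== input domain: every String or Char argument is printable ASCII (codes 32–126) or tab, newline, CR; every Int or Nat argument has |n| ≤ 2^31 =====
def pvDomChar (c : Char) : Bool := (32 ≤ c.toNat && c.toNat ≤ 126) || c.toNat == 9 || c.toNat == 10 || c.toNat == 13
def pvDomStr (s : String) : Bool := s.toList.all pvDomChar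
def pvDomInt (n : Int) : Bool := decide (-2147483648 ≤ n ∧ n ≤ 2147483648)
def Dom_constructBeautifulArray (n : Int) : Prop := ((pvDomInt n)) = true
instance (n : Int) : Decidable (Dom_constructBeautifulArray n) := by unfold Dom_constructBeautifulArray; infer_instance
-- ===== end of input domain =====

-- B replaces A's top-down memoized recursion by a bottom-up bit-reversal doubling loop
-- (alternative structure, similar cost); equivalence proved for n ≥ 1 (A raises RecursionError otherwise).

-- ===== PORT A =====
-- A's inner 'solve' with its base case memo = {1: [1]}; the memo is a pure cache and does not
-- change any computed value, so it is ported as plain recursion on the same call structure.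
-- The count = 0 branch is unreachable under Pre_ and carries an arbitrary value.
def solveA : Nat → List Int
  | 0 => []
  | 1 => [1]
  | (m+2) =>
      ((solveA ((m + 2 + 1) / 2)).map (fun x => 2 * x - 1)) ++
      ((solveA ((m + 2) / 2)).map (fun x => 2 * x))
decreasing_by all_goals omega

def constructBeautifulArray (n : Int) : List Int := solveA n.toNat

-- ===== PORT B =====
-- the while-loop of Source B: fuel n.toNat bounds the (≤ log₂ n) doubling steps
def growB (fuel : Nat) (n : Int) (seq : List Int) : List Int :=
  match fuel with
  | 0 => seq
  | f + 1 =>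
      if (seq.length : Int) < n then
        growB f n (seq.map (fun x => 2 * x) ++ seq.map (fun x => 2 * x + 1))
      else seq

def constructBeautifulArray_alt (n : Int) : List Int :=
  ((growB n.toNat n [0]).filter (fun x => decide (x < n))).map (fun x => x + 1)

-- ===== PRECONDITION & SPEC =====
-- For n ≤ 0 the Python A recurses forever on count ≤ 0 (RecursionError).
def Pre_constructBeautifulArray (n : Int) : Prop := 1 ≤ n
instance (n : Int) : Decidable (Pre_constructBeautifulArray n) := by unfold Pre_constructBeautifulArray; infer_instance
def pvWitness_constructBeautifulArray : Int := 5

def Spec_constructBeautifulArray (n : Int) (out : List Int) : Prop := out = constructBeautifulArray_alt n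
instance (n : Int) (out : List Int) : Decidable (Spec_constructBeautifulArray n out) := by unfold Spec_constructBeautifulArray; infer_instance

-- ===== CLAIM (what is proved, stated in full; the proofs are below) =====
def Claim_equal_constructBeautifulArray : Prop := ∀ (n : Int), Dom_constructBeautifulArray n → Pre_constructBeautifulArray n → Spec_constructBeautifulArray n (constructBeautifulArray n)

-- ===== LEMMAS AND PROOFS =====

-- the pure doubling sequence: bit-reversal order of 0 .. 2^k - 1
def bitseq : Nat → List Int
  | 0 => [0]
  | k + 1 => (bitseq k).map (fun x => 2 * x) ++ (bitseq k).map (fun x => 2 * x + 1)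

lemma bitseq_length (k : Nat) : (bitseq k).length = 2 ^ k := by
  induction k with
  | zero => rfl
  | succ k ih => simp [bitseq, ih]; ring

lemma bitseq_nonneg (k : Nat) : ∀ x ∈ bitseq k, 0 ≤ x := by
  induction k with
  | zero => intro x hx; simp [bitseq] at hx; omega
  | succ k ih =>
      intro x hx
      simp [bitseq] at hx
      rcases hx with ⟨y, hy, rfl⟩ | ⟨y, hy, rfl⟩ <;> have := ih y hy <;> omega

-- growB from any bitseq stage ends at some bitseq stage of length ≥ n
lemma growB_bitseq (f : Nat) : ∀ j : Nat, ∀ n : Int, n ≤ 2 ^ (j + f) →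
    ∃ k, n ≤ 2 ^ k ∧ growB f n (bitseq j) = bitseq k := by
  induction f with
  | zero =>
      intro j n hn
      exact ⟨j, by simpa using hn, rfl⟩
  | succ f ih =>
      intro j n hn
      by_cases h : ((bitseq j).length : Int) < n
      · have hstep : growB (f + 1) n (bitseq j) = growB f n (bitseq (j + 1)) := by
          simp [growB, h, bitseq]
        rw [hstep]
        exact ih (j + 1) n (by rwa [show j + 1 + f = j + (f + 1) from by omega])
      · exact ⟨j, by rw [bitseq_length] at h; push_cast at h ⊢; omega, by simp [growB, h]⟩

-- key invariant: for 1 ≤ n ≤ 2^k, filtering bitseq k below n and shifting gives A's solve n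
lemma filter_bitseq_eq_solveA (k : Nat) : ∀ n : Nat, 1 ≤ n → n ≤ 2 ^ k →
    ((bitseq k).filter (fun x => decide (x < (n : Int)))).map (fun x => x + 1) = solveA n := by
  induction k with
  | zero =>
      intro n h1 h2
      have : n = 1 := by omega
      subst this
      norm_num [bitseq, solveA]
  | succ k ih =>
      intro n h1 h2
      rcases Nat.lt_or_ge n 2 with hn1 | hn2
      · -- n = 1
        have : n = 1 := by omega
        subst this
        have ih1 := ih 1 (by omega) (Nat.one_le_two_pow)
        simp only [Nat.cast_one] at ih1 ⊢
        -- filter (< 1) over the doubled list keeps only the doubled zeros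
        have hsnd : (((bitseq k).map (fun x => 2 * x + 1)).filter (fun x => decide (x < (1 : Int)))) = [] := by
          rw [List.filter_eq_nil_iff]
          intro a ha
          simp at ha ⊢
          rcases ha with ⟨y, hy, rfl⟩
          have := bitseq_nonneg k y hy; omega
        have hfst : (((bitseq k).map (fun x => 2 * x)).filter (fun x => decide (x < (1 : Int))))
            = ((bitseq k).filter (fun x => decide (x < (1 : Int)))).map (fun x => 2 * x) := by
          rw [List.filter_map]
          congr 1
          apply List.filter_congr
          intro a ha
          have := bitseq_nonneg k a ha
          simp; omega
        have hs1 : solveA 1 = [1] := by rw [solveA]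
        have hone : ((bitseq k).filter (fun x => decide (x < (1 : Int)))) = [0] := by
          have h1 := ih1
          rw [hs1] at h1
          rcases hlist : ((bitseq k).filter (fun x => decide (x < (1 : Int)))) with _ | ⟨a, l⟩
          · rw [hlist] at h1; simp at h1
          · rw [hlist] at h1
            rcases l with _ | ⟨b, l'⟩
            · simp at h1 ⊢; omega
            · simp at h1
        rw [hs1]
        simp only [bitseq, List.filter_append, hsnd, hfst, hone]
        simp
      · -- n ≥ 2
        have hc1 : 1 ≤ (n + 1) / 2 := by omega
        have hc2 : (n + 1) / 2 ≤ 2 ^ k := by omega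
        have hd1 : 1 ≤ n / 2 := by omega
        have hd2 : n / 2 ≤ 2 ^ k := by omega
        have ihc := ih ((n + 1) / 2) hc1 hc2
        have ihd := ih (n / 2) hd1 hd2
        have hfst : (((bitseq k).map (fun x => 2 * x)).filter (fun x => decide (x < (n : Int))))
            = ((bitseq k).filter (fun x => decide (x < (((n + 1) / 2 : Nat) : Int)))).map (fun x => 2 * x) := by
          rw [List.filter_map]
          congr 1
          apply List.filter_congr
          intro a _
          simp only [Function.comp]
          have hcast : (((n + 1) / 2 : Nat) : Int) = ((n : Int) + 1) / 2 := by push_cast; omega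
          simp [hcast]; omega
        have hsnd : (((bitseq k).map (fun x => 2 * x + 1)).filter (fun x => decide (x < (n : Int))))
            = ((bitseq k).filter (fun x => decide (x < ((n / 2 : Nat) : Int)))).map (fun x => 2 * x + 1) := by
          rw [List.filter_map]
          congr 1
          apply List.filter_congr
          intro a _
          simp only [Function.comp]
          have hcast : ((n / 2 : Nat) : Int) = (n : Int) / 2 := by push_cast; omega
          simp [hcast]; omega
        have hsolve : solveA n = ((solveA ((n + 1) / 2)).map (fun x => 2 * x - 1)) ++
            ((solveA (n / 2)).map (fun x => 2 * x)) := by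
          obtain ⟨m, rfl⟩ : ∃ m, n = m + 2 := ⟨n - 2, by omega⟩
          rw [solveA]
        rw [hsolve, ← ihc, ← ihd]
        simp only [bitseq, List.filter_append, hfst, hsnd, List.map_append, List.map_map]
        congr 1 <;> (apply List.map_congr_left; intro a _; simp only [Function.comp]; ring)

-- ===== VERDICT (by name: the statement is the Claim_ definition above) =====
theorem constructBeautifulArray_spec : Claim_equal_constructBeautifulArray := by
  intro n _ hpre
  unfold Spec_constructBeautifulArray constructBeautifulArray constructBeautifulArray_alt
  have h1 : 1 ≤ n.toNat := by unfold Pre_constructBeautifulArray at hpre; omega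
  have hfuel : n ≤ 2 ^ (0 + n.toNat) := by
    rw [Nat.zero_add]
    have h := Nat.lt_two_pow_self (n := n.toNat)
    have : ((2 ^ n.toNat : Nat) : Int) = 2 ^ n.toNat := by push_cast; ring
    zify at h
    omega
  obtain ⟨k, hk, hgrow⟩ := growB_bitseq n.toNat 0 n hfuel
  have : growB n.toNat n [0] = bitseq k := by
    have : bitseq 0 = [0] := rfl
    rw [← this]; exact hgrow
  rw [this]
  have hn2k : n.toNat ≤ 2 ^ k := by
    have : ((2 ^ k : Nat) : Int) = 2 ^ k := by push_cast; ring
    omega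
  have := filter_bitseq_eq_solveA k n.toNat h1 hn2k
  rw [← this]
  congr 2
  have : ((n.toNat : Nat) : Int) = n := by omega
  rw [this]
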